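-- pv_equiv track=rewrite | github.com/jconnelly/micro-agent-development | Agents/BusinessRuleExtractionAgent.py | _find_smart_boundary
-- ===== SOURCE A (Python) =====
-- from typing import Dict, Any, List, Optional, Tuple
--
-- def _find_smart_boundary(lines: List[str], target_pos: int, search_window: int = 10) -> int:
--     """
--     Find natural breaking points near target position to avoid splitting rules/logical blocks.
--     """
--     if target_pos >= len(lines):
--         return len(lines)
--
--     # Prefer these boundaries (in order of preference)
--     boundary_patterns = [
--         lambda line: line.strip() == '',  # Empty lines (highest preference)
--         lambda line: line.strip().startswith(';;') or line.strip().startswith('#'),  # Comments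
--         lambda line: line.strip().startswith('//') or line.strip().startswith('/*'),  # C-style comments
--         lambda line: line.strip().endswith('}') or line.strip().endswith('});'),  # Code block ends
--         lambda line: line.strip().startswith('(defrule'),  # CLIPS rules
--         lambda line: line.strip().startswith('rule '),  # Drools rules
--         lambda line: line.strip().startswith('function ') or line.strip().startswith('def '),  # Functions
--         lambda line: line.strip().startswith('<') and '>' in line,  # XML tags
--         lambda line: line.strip().endswith(';'),  # Statement ends
--     ]
--
--     # Search within window for best boundary
--     for pattern in boundary_patterns:
--         for offset in range(-search_window, search_window + 1):
--             pos = target_pos + offset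
--             if 0 <= pos < len(lines) and pattern(lines[pos]):
--                 return pos + 1 if pos + 1 <= len(lines) else len(lines)
--
--     return target_pos  # Fall back to original position
-- ===== SOURCE B (Python) =====
-- def _find_smart_boundary(lines, target_pos, search_window=10):
--     if target_pos >= len(lines):
--         return len(lines)
--
--     patterns = [
--         lambda line: line.strip() == '',
--         lambda line: line.strip().startswith(';;') or line.strip().startswith('#'),
--         lambda line: line.strip().startswith('//') or line.strip().startswith('/*'),
--         lambda line: line.strip().endswith('}') or line.strip().endswith('});'),
--         lambda line: line.strip().startswith('(defrule'),
--         lambda line: line.strip().startswith('rule '),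
--         lambda line: line.strip().startswith('function ') or line.strip().startswith('def '),
--         lambda line: line.strip().startswith('<') and '>' in line,
--         lambda line: line.strip().endswith(';'),
--     ]
--
--     # Single pass over offsets: rank each in-range line by its first matching
--     # pattern; keep the strictly best rank so the earliest offset wins a tie.
--     best_rank = len(patterns)
--     best_pos = target_pos
--     for offset in range(-search_window, search_window + 1):
--         pos = target_pos + offset
--         if 0 <= pos < len(lines):
--             rank = next((i for i, p in enumerate(patterns) if p(lines[pos])), len(patterns))
--             if rank < best_rank:
--                 best_rank = rank
--                 best_pos = pos
--     if best_rank < len(patterns):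
--         return best_pos + 1 if best_pos + 1 <= len(lines) else len(lines)
--     return target_pos
-- ===== Notes on version B (the rewrite author's own statement) =====
-- stated objective: alternative
-- what changed: Replaces A's pattern-major nested search with early return by a single ascending pass over offsets that ranks each line by its first matching pattern and keeps the strictly smallest (rank, earliest offset) in an accumulator.
import Mathlib
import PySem

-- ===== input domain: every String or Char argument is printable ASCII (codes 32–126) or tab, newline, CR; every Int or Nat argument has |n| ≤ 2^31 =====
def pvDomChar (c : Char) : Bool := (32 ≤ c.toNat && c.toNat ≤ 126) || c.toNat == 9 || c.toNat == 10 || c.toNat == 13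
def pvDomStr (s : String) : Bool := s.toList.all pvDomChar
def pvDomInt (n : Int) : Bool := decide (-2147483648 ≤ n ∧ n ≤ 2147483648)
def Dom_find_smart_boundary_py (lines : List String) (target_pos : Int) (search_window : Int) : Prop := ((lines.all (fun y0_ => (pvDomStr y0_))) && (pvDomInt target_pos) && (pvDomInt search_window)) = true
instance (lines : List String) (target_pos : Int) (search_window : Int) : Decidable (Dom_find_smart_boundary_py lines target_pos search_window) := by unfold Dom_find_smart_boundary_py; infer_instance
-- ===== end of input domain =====

-- B replaces A's pattern-major nested search (early return on the first pattern with a hit)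
-- by one ascending pass over offsets keeping a running minimum (pattern rank, earliest position);
-- objective: alternative decomposition, same cost.

-- the nine boundary predicates, in A's preference order (shared by both Pythons verbatim)
def pvPatterns : List (String → Bool) :=
  [ fun line => PySem.Str.strip line == "",
    fun line => PySem.Str.startswith (PySem.Str.strip line) ";;" || PySem.Str.startswith (PySem.Str.strip line) "#",
    fun line => PySem.Str.startswith (PySem.Str.strip line) "//" || PySem.Str.startswith (PySem.Str.strip line) "/*",
    fun line => PySem.Str.endswith (PySem.Str.strip line) "}" || PySem.Str.endswith (PySem.Str.strip line) "});",
    fun line => PySem.Str.startswith (PySem.Str.strip line) "(defrule",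
    fun line => PySem.Str.startswith (PySem.Str.strip line) "rule ",
    fun line => PySem.Str.startswith (PySem.Str.strip line) "function " || PySem.Str.startswith (PySem.Str.strip line) "def ",
    fun line => PySem.Str.startswith (PySem.Str.strip line) "<" && PySem.Str.isIn ">" line,
    fun line => PySem.Str.endswith (PySem.Str.strip line) ";" ]

-- 'pos + 1 if pos + 1 <= len(lines) else len(lines)' (identical expression in both Pythons)
def pvClamp (lines : List String) (pos : Int) : Int :=
  if pos + 1 ≤ (lines.length : Int) then pos + 1 else (lines.length : Int)

-- ===== PORT A =====
-- '0 <= pos < len(lines) and pattern(lines[pos])'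
def pvMatchAt (lines : List String) (pos : Int) (pat : String → Bool) : Bool :=
  (decide (0 ≤ pos) && decide (pos < (lines.length : Int))) && pat ((PySem.List.pyGet? lines pos).getD "")

def find_smart_boundary_py (lines : List String) (target_pos : Int) (search_window : Int) : Int :=
  if (lines.length : Int) ≤ target_pos then (lines.length : Int)
  else
    ((pvPatterns.findSome? (fun pat =>
        (PySem.List.pyRange (-search_window) (search_window + 1) 1).findSome? (fun off =>
          if pvMatchAt lines (target_pos + off) pat then some (pvClamp lines (target_pos + off))
          else none))).getD target_pos)

-- ===== PORT B =====
-- rank of a line: index of the first matching pattern (9 = len(patterns) if none)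
def pvRankB (lines : List String) (pos : Int) : Nat :=
  pvPatterns.findIdx (fun p => p ((PySem.List.pyGet? lines pos).getD ""))

def find_smart_boundary_py_alt (lines : List String) (target_pos : Int) (search_window : Int) : Int :=
  if (lines.length : Int) ≤ target_pos then (lines.length : Int)
  else
    let res := (PySem.List.pyRange (-search_window) (search_window + 1) 1).foldl
      (fun (s : Nat × Int) off =>
        let pos := target_pos + off
        if decide (0 ≤ pos) && decide (pos < (lines.length : Int)) then
          let r := pvRankB lines pos
          if r < s.1 then (r, pos) else s
        else s)
      (pvPatterns.length, target_pos)
    if res.1 < pvPatterns.length then pvClamp lines res.2 else target_pos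

-- ===== PRECONDITION & SPEC =====
def Spec_find_smart_boundary_py (lines : List String) (target_pos : Int) (search_window : Int) (out : Int) : Prop := out = find_smart_boundary_py_alt lines target_pos search_window
instance (lines : List String) (target_pos : Int) (search_window : Int) (out : Int) : Decidable (Spec_find_smart_boundary_py lines target_pos search_window out) := by unfold Spec_find_smart_boundary_py; infer_instance

-- ===== CLAIM (what is proved, stated in full; the proofs are below) =====
def Claim_equal_find_smart_boundary_py : Prop := ∀ (lines : List String) (target_pos : Int) (search_window : Int), Dom_find_smart_boundary_py lines target_pos search_window → Spec_find_smart_boundary_py lines target_pos search_window (find_smart_boundary_py lines target_pos search_window)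

-- ===== LEMMAS AND PROOFS =====

-- first element of L whose key is < N, attaining the minimal key (earliest wins ties), with its key
def pvSpecB {α : Type} (key : α → Nat) (N : Nat) : List α → Option (Nat × α)
  | [] => none
  | x :: t =>
    if key x < N then
      match pvSpecB key N t with
      | none => some (key x, x)
      | some (r, y) => if r < key x then some (r, y) else some (key x, x)
    else pvSpecB key N t

theorem pvFindSome?_ite {α β : Type} (c : α → Bool) (out : α → β) :
    ∀ (L : List α), L.findSome? (fun x => if c x then some (out x) else none) = (L.find? c).map out := by
  intro L
  induction L with
  | nil => rfl
  | cons x t ih =>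
    by_cases h : c x = true
    · simp [List.find?_cons, h]
    · simp only [Bool.not_eq_true] at h
      simp [List.find?_cons, h, ih]

theorem pvFindSome?_map {γ α β : Type} (h : γ → Option α) (out : α → β) :
    ∀ (ps : List γ), ps.findSome? (fun p => (h p).map out) = (ps.findSome? h).map out := by
  intro ps
  induction ps with
  | nil => rfl
  | cons p t ih =>
    cases hp : h p <;> simp [List.findSome?_cons, hp, ih]

theorem pvSpecB_none {α : Type} (key : α → Nat) (N : Nat) :
    ∀ (L : List α), (∀ x ∈ L, ¬ key x < N) → pvSpecB key N L = none := by
  intro L hL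
  induction L with
  | nil => rfl
  | cons x t ih =>
    have hx : ¬ key x < N := hL x (by simp)
    simp [pvSpecB, hx, ih (fun y hy => hL y (by simp [hy]))]

theorem pvSpecB_lt {α : Type} (key : α → Nat) (N : Nat) :
    ∀ (L : List α) (r : Nat) (y : α), pvSpecB key N L = some (r, y) → r < N := by
  intro L
  induction L with
  | nil => intro r y h; simp [pvSpecB] at h
  | cons x t ih =>
    intro r y h
    by_cases hx : key x < N
    · simp only [pvSpecB, if_pos hx] at h
      cases ht : pvSpecB key N t with
      | none => rw [ht] at h; simp at h; omega
      | some s =>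
        rw [ht] at h
        rcases s with ⟨r', y'⟩
        by_cases hr : r' < key x
        · simp [hr] at h; have := ih r' y' ht; omega
        · simp [hr] at h; omega
    · simp only [pvSpecB, if_neg hx] at h
      exact ih r y h

theorem pvSpecB_shift {α : Type} (key₁ key₂ : α → Nat) (N : Nat) :
    ∀ (L : List α), (∀ x ∈ L, key₂ x = key₁ x + 1) →
      pvSpecB key₂ (N + 1) L = (pvSpecB key₁ N L).map (fun s => (s.1 + 1, s.2)) := by
  intro L hL
  induction L with
  | nil => rfl
  | cons x t ih =>
    have hx : key₂ x = key₁ x + 1 := hL x (by simp)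
    have ih' := ih (fun y hy => hL y (by simp [hy]))
    by_cases h1 : key₁ x < N
    · have h2 : key₂ x < N + 1 := by omega
      simp only [pvSpecB, if_pos h1, if_pos h2, ih']
      cases ht : pvSpecB key₁ N t with
      | none => simp [hx]
      | some s =>
        rcases s with ⟨r, y⟩
        by_cases hr : r < key₁ x
        · have : r + 1 < key₂ x := by omega
          simp [hr, this]
        · have : ¬ r + 1 < key₂ x := by omega
          simp [hr, this, hx]
    · have h2 : ¬ key₂ x < N + 1 := by omega
      simp only [pvSpecB, if_neg h1, if_neg h2, ih']

theorem pvSpecB_zero {α : Type} (key : α → Nat) (N : Nat) (c : α → Bool)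
    (hN : 0 < N) (hkey : ∀ x, key x = 0 ↔ c x = true) :
    ∀ (L : List α) (x₀ : α), L.find? c = some x₀ → pvSpecB key N L = some (0, x₀) := by
  intro L
  induction L with
  | nil => intro x₀ h; simp at h
  | cons x t ih =>
    intro x₀ h
    by_cases hc : c x = true
    · rw [List.find?_cons_of_pos hc] at h
      injection h with h; subst h
      have hk : key x = 0 := (hkey x).mpr hc
      simp only [pvSpecB, hk, if_pos hN]
      cases ht : pvSpecB key N t with
      | none => rfl
      | some s =>
        rcases s with ⟨r, y⟩
        have : ¬ r < 0 := by omega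
        simp [this]
    · have hc' : c x = false := by simpa using hc
      rw [List.find?_cons_of_neg (by simp [hc'])] at h
      have hk : ¬ key x = 0 := fun h0 => hc ((hkey x).mp h0)
      have iht := ih x₀ h
      by_cases hlt : key x < N
      · simp only [pvSpecB, if_pos hlt, iht]
        have : (0 : Nat) < key x := by omega
        simp [this]
      · simp only [pvSpecB, if_neg hlt, iht]

-- A's nested short-circuit search equals the first-minimum spec over the combined key
theorem pvAFind_eq {σ α : Type} (good : α → Bool) (f : α → σ) (L : List α) :
    ∀ (ps : List (σ → Bool)),
      ps.findSome? (fun p => L.find? (fun x => good x && p (f x)))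
        = (pvSpecB (fun x => if good x then ps.findIdx (fun p => p (f x)) else ps.length) ps.length L).map (fun s => s.2) := by
  intro ps
  induction ps with
  | nil =>
    rw [pvSpecB_none (fun x => if good x then ([] : List (σ → Bool)).findIdx (fun p => p (f x)) else ([] : List (σ → Bool)).length)
        ([] : List (σ → Bool)).length L (fun x _ => by simp)]
    rfl
  | cons p ps ih =>
    cases hf : L.find? (fun x => good x && p (f x)) with
    | some x₀ =>
      have hz := pvSpecB_zero
        (fun x => if good x then (p :: ps).findIdx (fun q => q (f x)) else (p :: ps).length)
        (p :: ps).length (fun x => good x && p (f x))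
        (by simp) ?_ L x₀ hf
      · rw [List.findSome?_cons, hf, hz]
        rfl
      · intro x
        by_cases hg : good x = true
        · by_cases hp : p (f x) = true
          · simp [hg, hp, List.findIdx_cons]
          · simp only [Bool.not_eq_true] at hp
            simp [hg, hp, List.findIdx_cons]
        · simp only [Bool.not_eq_true] at hg
          simp [hg]
    | none =>
      have hnone : ∀ x ∈ L, ¬ (good x && p (f x)) = true := by
        intro x hx
        have := List.find?_eq_none.mp hf x hx
        simpa using this
      have hshift := pvSpecB_shift
        (fun x => if good x then ps.findIdx (fun q => q (f x)) else ps.length)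
        (fun x => if good x then (p :: ps).findIdx (fun q => q (f x)) else (p :: ps).length)
        ps.length L ?_
      · rw [List.findSome?_cons, hf]
        show List.findSome? (fun p => List.find? (fun x => good x && p (f x)) L) ps = _
        simp only [List.length_cons] at hshift ⊢
        rw [hshift, Option.map_map]
        have hcomp : ((fun s : Nat × α => s.2) ∘ fun s : Nat × α => (s.1 + 1, s.2)) = (fun s : Nat × α => s.2) :=
          funext (fun s => rfl)
        rw [hcomp]
        exact ih
      · intro x hx
        by_cases hg : good x = true
        · have hp : p (f x) = false := by
            have := hnone x hx
            simp [hg] at this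
            simpa using this
          simp [hg, hp, List.findIdx_cons]
        · simp only [Bool.not_eq_true] at hg
          simp [hg, List.length_cons]

-- B's running-minimum fold equals the first-minimum spec
theorem pvFold_eq {α β : Type} (key : α → Nat) (N : Nat) (val : α → β) (step : Nat × β → α → Nat × β)
    (hkey : ∀ x, key x ≤ N)
    (hstep : ∀ s x, s.1 ≤ N → step s x = if key x < s.1 then (key x, val x) else s) :
    ∀ (L : List α) (s : Nat × β), s.1 ≤ N →
      L.foldl step s = (match pvSpecB key N L with
        | none => s
        | some (r, y) => if r < s.1 then (r, val y) else s) := by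
  intro L
  induction L with
  | nil => intro s _; rfl
  | cons x t ih =>
    intro s hs
    have hstepx := hstep s x hs
    by_cases hlt : key x < s.1
    · have hxN : key x < N := by omega
      have hs' : (step s x).1 ≤ N := by rw [hstepx, if_pos hlt]; exact hkey x
      have iht := ih (step s x) hs'
      rw [List.foldl_cons, iht]
      simp only [pvSpecB, if_pos hxN]
      cases ht : pvSpecB key N t with
      | none => simp [hstepx, if_pos hlt]
      | some p =>
        rcases p with ⟨r, y⟩
        by_cases hr : r < key x
        · have h1 : r < s.1 := by omega
          simp [hr, hstepx, if_pos hlt, h1]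
        · have h1 : ¬ r < (key x, val x).1 := by simpa using hr
          simp [hr, hstepx, if_pos hlt, h1]
    · have hsx : step s x = s := by rw [hstepx, if_neg hlt]
      have iht := ih s hs
      rw [List.foldl_cons, hsx, iht]
      by_cases hxN : key x < N
      · simp only [pvSpecB, if_pos hxN]
        cases ht : pvSpecB key N t with
        | none => simp [hlt]
        | some p =>
          rcases p with ⟨r, y⟩
          by_cases hr : r < key x
          · simp [hr]
          · have h1 : ¬ r < s.1 := by omega
            simp [hr, hlt, h1]
      · simp only [pvSpecB, if_neg hxN]

-- proof-only abbreviations (definitionally equal to the expressions inside the ports)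
def pvGood (lines : List String) (tp off : Int) : Bool :=
  decide (0 ≤ tp + off) && decide (tp + off < (lines.length : Int))

def pvKey (lines : List String) (tp : Int) (off : Int) : Nat :=
  if pvGood lines tp off then pvRankB lines (tp + off) else pvPatterns.length

-- ===== VERDICT (by name: the statement is the Claim_ definition above) =====
theorem find_smart_boundary_py_spec : Claim_equal_find_smart_boundary_py := by
  intro lines target_pos search_window _
  unfold Spec_find_smart_boundary_py find_smart_boundary_py find_smart_boundary_py_alt
  by_cases hguard : (lines.length : Int) ≤ target_pos
  · simp [hguard]
  · simp only [if_neg hguard]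
    set L := PySem.List.pyRange (-search_window) (search_window + 1) 1 with hL
    show (pvPatterns.findSome? (fun pat =>
        L.findSome? (fun off =>
          if pvMatchAt lines (target_pos + off) pat then some (pvClamp lines (target_pos + off))
          else none))).getD target_pos
      = (if (L.foldl
            (fun (s : Nat × Int) off =>
              if pvGood lines target_pos off then
                (if pvRankB lines (target_pos + off) < s.1 then (pvRankB lines (target_pos + off), target_pos + off) else s)
              else s)
            (pvPatterns.length, target_pos)).1 < pvPatterns.length
        then pvClamp lines (L.foldl
            (fun (s : Nat × Int) off =>
              if pvGood lines target_pos off then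
                (if pvRankB lines (target_pos + off) < s.1 then (pvRankB lines (target_pos + off), target_pos + off) else s)
              else s)
            (pvPatterns.length, target_pos)).2
        else target_pos)
    have hA : (pvPatterns.findSome? (fun pat =>
        L.findSome? (fun off =>
          if pvMatchAt lines (target_pos + off) pat then some (pvClamp lines (target_pos + off))
          else none)))
        = (pvSpecB (pvKey lines target_pos) pvPatterns.length L).map (fun s => pvClamp lines (target_pos + s.2)) := by
      have hinner : ∀ pat : String → Bool,
          L.findSome? (fun off =>
            if pvMatchAt lines (target_pos + off) pat then some (pvClamp lines (target_pos + off))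
            else none)
          = (L.find? (fun off => pvGood lines target_pos off && pat ((PySem.List.pyGet? lines (target_pos + off)).getD ""))).map
              (fun off => pvClamp lines (target_pos + off)) := by
        intro pat
        have h := pvFindSome?_ite
          (fun off => pvGood lines target_pos off && pat ((PySem.List.pyGet? lines (target_pos + off)).getD ""))
          (fun off => pvClamp lines (target_pos + off)) L
        rw [← h]
        rfl
      calc pvPatterns.findSome? (fun pat =>
              L.findSome? (fun off =>
                if pvMatchAt lines (target_pos + off) pat then some (pvClamp lines (target_pos + off))
                else none))
          = pvPatterns.findSome? (fun pat =>
              (L.find? (fun off => pvGood lines target_pos off && pat ((PySem.List.pyGet? lines (target_pos + off)).getD ""))).map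
                (fun off => pvClamp lines (target_pos + off))) :=
            congrArg (fun g => List.findSome? g pvPatterns) (funext hinner)
        _ = (pvPatterns.findSome? (fun pat =>
              L.find? (fun off => pvGood lines target_pos off && pat ((PySem.List.pyGet? lines (target_pos + off)).getD "")))).map
              (fun off => pvClamp lines (target_pos + off)) :=
            pvFindSome?_map _ _ pvPatterns
        _ = (pvSpecB (pvKey lines target_pos) pvPatterns.length L).map (fun s => pvClamp lines (target_pos + s.2)) := by
            rw [pvAFind_eq (fun off => pvGood lines target_pos off)
                (fun off => (PySem.List.pyGet? lines (target_pos + off)).getD "") L pvPatterns, Option.map_map]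
            rfl
    have hkey1 : ∀ off : Int, pvKey lines target_pos off ≤ pvPatterns.length := by
      intro off
      by_cases hg : pvGood lines target_pos off = true
      · rw [pvKey, if_pos hg]
        exact List.findIdx_le_length
      · rw [pvKey, if_neg hg]
    have hstep1 : ∀ (s : Nat × Int) (off : Int), s.1 ≤ pvPatterns.length →
        (fun (s : Nat × Int) off =>
          if pvGood lines target_pos off then
            (if pvRankB lines (target_pos + off) < s.1 then (pvRankB lines (target_pos + off), target_pos + off) else s)
          else s) s off
        = if pvKey lines target_pos off < s.1 then (pvKey lines target_pos off, target_pos + off) else s := by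
      intro s off hs
      by_cases hg : pvGood lines target_pos off = true
      · have hk : pvKey lines target_pos off = pvRankB lines (target_pos + off) := by rw [pvKey, if_pos hg]
        simp only [hg, if_true, hk]
      · have hk : pvKey lines target_pos off = pvPatterns.length := by rw [pvKey, if_neg hg]
        have hnot : ¬ pvKey lines target_pos off < s.1 := by omega
        simp only [Bool.not_eq_true] at hg
        simp only [hg, Bool.false_eq_true, if_false, if_neg hnot]
    have hB := pvFold_eq (pvKey lines target_pos) pvPatterns.length (fun off => target_pos + off)
      (fun (s : Nat × Int) off =>
        if pvGood lines target_pos off then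
          (if pvRankB lines (target_pos + off) < s.1 then (pvRankB lines (target_pos + off), target_pos + off) else s)
        else s)
      hkey1 hstep1 L (pvPatterns.length, target_pos) (Nat.le_refl _)
    rw [hA, hB]
    cases hspec : pvSpecB (pvKey lines target_pos) pvPatterns.length L with
    | none => simp
    | some p =>
      rcases p with ⟨r, y⟩
      have hr : r < pvPatterns.length := pvSpecB_lt (pvKey lines target_pos) pvPatterns.length L r y hspec
      simp [hr]
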